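-- pv_equiv track=rewrite | github.com/nribjoaovictor/python_exercicios | listas_e_matriz/itensvazios.py | f_filtrador
-- ===== SOURCE A (Python) =====
-- def f_filtrador(d,valor):
--     lst=[]
--     for k in d.keys():
--         if d[k]<valor:
--             lst.append(k)
--     for k in lst:
--         del d[k]
--     return d
-- ===== SOURCE B (Python) =====
-- def f_filtrador(d, valor):
--     kept = {k: v for k, v in d.items() if not v < valor}
--     d.clear()
--     d.update(kept)
--     return d
-- ===== Notes on version B (the rewrite author's own statement) =====
-- stated objective: simpler
-- what changed: Replaces A's two-pass collect-keys-then-delete strategy with a single keep-then-rebuild pass: a comprehension builds the surviving entries and d is rebuilt in place via clear()+update(), preserving identity and order.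
import Mathlib
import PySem

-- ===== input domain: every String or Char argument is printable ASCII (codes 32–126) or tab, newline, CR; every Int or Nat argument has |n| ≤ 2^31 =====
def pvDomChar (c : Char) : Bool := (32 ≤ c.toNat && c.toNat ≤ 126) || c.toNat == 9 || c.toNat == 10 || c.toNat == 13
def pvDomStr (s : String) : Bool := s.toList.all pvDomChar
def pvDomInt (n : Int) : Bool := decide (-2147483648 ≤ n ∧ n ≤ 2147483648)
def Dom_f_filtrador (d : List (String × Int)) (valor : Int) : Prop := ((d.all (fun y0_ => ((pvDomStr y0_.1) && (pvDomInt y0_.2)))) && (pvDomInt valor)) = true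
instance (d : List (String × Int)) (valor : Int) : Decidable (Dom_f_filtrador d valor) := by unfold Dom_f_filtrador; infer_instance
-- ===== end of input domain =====

-- B rebuilds d in one keep-then-rebuild pass (comprehension + clear/update) instead of A's
-- collect-keys-then-delete two passes; both mutate d in place and return it, so the
-- return-value equivalence proved here also covers the observable mutation.

-- ===== PORT A =====
-- d[k] is ported as (Dict.mk d).getD k 0: exact, since every looked-up k comes from d.keys
-- (KeyError unreachable); 'del d[k]' removes the single entry with key k, exact under Pre_'s
-- distinct-keys requirement as List.eraseP of the first match.
def f_filtrador (d : List (String × Int)) (valor : Int) : List (String × Int) :=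
  ((d.map Prod.fst).foldl
    (fun lst k => if (PySem.Dict.mk d).getD k 0 < valor then lst ++ [k] else lst) []).foldl
    (fun d k => d.eraseP (fun kv => kv.1 == k)) d

-- ===== PORT B =====
def f_filtrador_alt (d : List (String × Int)) (valor : Int) : List (String × Int) :=
  d.filter (fun kv => !(decide (kv.2 < valor)))

-- ===== PRECONDITION & SPEC =====
-- Pre_ requires the keys of d to be pairwise distinct: d is a Python dict, which cannot hold
-- duplicate keys, so this is exactly the natural domain (it excludes no dict input).
def Pre_f_filtrador (d : List (String × Int)) (valor : Int) : Prop :=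
  (d.map Prod.fst).Nodup
instance (d : List (String × Int)) (valor : Int) : Decidable (Pre_f_filtrador d valor) := by
  unfold Pre_f_filtrador; infer_instance
def pvWitness_f_filtrador : (List (String × Int)) × Int := ([("a", 1), ("b", 5)], 3)
def Spec_f_filtrador (d : List (String × Int)) (valor : Int) (out : List (String × Int)) : Prop := out = f_filtrador_alt d valor
instance (d : List (String × Int)) (valor : Int) (out : List (String × Int)) : Decidable (Spec_f_filtrador d valor out) := by unfold Spec_f_filtrador; infer_instance

-- ===== CLAIM (what is proved, stated in full; the proofs are below) =====
def Claim_equal_f_filtrador : Prop := ∀ (d : List (String × Int)) (valor : Int), Dom_f_filtrador d valor → Pre_f_filtrador d valor → Spec_f_filtrador d valor (f_filtrador d valor)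

-- ===== LEMMAS AND PROOFS =====

-- getD on a duplicate-free association list returns the entry's value.
lemma getD_mk_of_mem (d : List (String × Int)) (k : String) (v : Int)
    (hnd : (d.map Prod.fst).Nodup) (hmem : (k, v) ∈ d) :
    (PySem.Dict.mk d).getD k 0 = v := by
  apply PySem.Dict.getD_of_mem_items (d := PySem.Dict.mk d) <;>
    simpa [PySem.Dict.items, PySem.Dict.keys]

-- eraseP of the (unique) matching key equals filtering that key out.
lemma eraseP_eq_filter (d : List (String × Int)) (k : String)
    (hnd : (d.map Prod.fst).Nodup) :
    d.eraseP (fun kv => kv.1 == k) = d.filter (fun kv => !(kv.1 == k)) := by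
  induction d with
  | nil => rfl
  | cons a t ih =>
    simp only [List.map_cons, List.nodup_cons] at hnd
    by_cases h : a.1 = k
    · have ht : t.filter (fun kv => !(kv.1 == k)) = t := by
        apply List.filter_eq_self.mpr
        intro kv hkv
        have hne : kv.1 ≠ k := by
          intro hk
          exact hnd.1 (h ▸ hk ▸ List.mem_map_of_mem (f := Prod.fst) hkv)
        simp [hne]
      simp [h, ht]
    · simp [h, ih hnd.2]

-- the delete loop removes exactly the entries whose key is in ks.
lemma erase_fold_eq_filter (ks : List String) (d : List (String × Int))
    (hnd : (d.map Prod.fst).Nodup) :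
    ks.foldl (fun d k => d.eraseP (fun kv => kv.1 == k)) d
      = d.filter (fun kv => !(ks.contains kv.1)) := by
  induction ks generalizing d with
  | nil => simp
  | cons k ks ih =>
    have hsub : ((d.filter (fun kv => !(kv.1 == k))).map Prod.fst).Sublist (d.map Prod.fst) :=
      (List.filter_sublist (l := d)).map Prod.fst
    have hnd' : ((d.filter (fun kv => !(kv.1 == k))).map Prod.fst).Nodup := hnd.sublist hsub
    rw [List.foldl_cons, eraseP_eq_filter d k hnd, ih _ hnd', List.filter_filter]
    apply List.filter_congr
    intro kv _
    by_cases h : kv.1 = k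
    · simp [h]
    · simp [h]

-- keys determine entries on a duplicate-free association list.
lemma entry_inj (d : List (String × Int)) (hnd : (d.map Prod.fst).Nodup)
    (kw kv : String × Int) (hw : kw ∈ d) (hv : kv ∈ d) (hk : kw.1 = kv.1) : kw = kv :=
  List.inj_on_of_nodup_map hnd hw hv hk

theorem f_filtrador_spec : Claim_equal_f_filtrador := by
  intro d valor _ hpre
  unfold Spec_f_filtrador f_filtrador f_filtrador_alt
  rw [PySem.List.foldl_append_ite_eq_filter, List.nil_append]
  rw [List.filter_map, erase_fold_eq_filter _ _ hpre]
  apply List.filter_congr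
  intro kv hkv
  have hval : (PySem.Dict.mk d).getD kv.1 0 = kv.2 := getD_mk_of_mem d kv.1 kv.2 hpre hkv
  congr 1
  simp only [List.contains_eq_mem, decide_eq_decide]
  constructor
  · intro hmem
    obtain ⟨kw, hkw, hk⟩ := List.mem_map.mp hmem
    obtain ⟨hkwd, hkwlt⟩ := List.mem_filter.mp hkw
    have heq : kw = kv := entry_inj d hpre kw kv hkwd hkv hk
    subst heq
    simp only [Function.comp] at hkwlt
    rw [hval] at hkwlt
    exact of_decide_eq_true hkwlt
  · intro hlt
    exact List.mem_map.mpr ⟨kv, List.mem_filter.mpr ⟨hkv, by simp [Function.comp, hval, hlt]⟩, rfl⟩
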